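-- pv_equiv track=rewrite | github.com/evgeniy-kulikov/unified-state-exam | 02/task_02_02.py | fn
-- ===== SOURCE A (Python) =====
-- def fn(a):
--     for x in range(1, 1000):  # целых положительных   x
--         for y in range(1, 1000):  # целых положительных   y
--             f1 = y - x ** 2 != 80
--             f2 = a < 13 * x - 14
--             f3 = a < y ** 2 + 15
--             if not (f1 or f2 or f3):
--                 return False
--     return True
-- ===== SOURCE B (Python) =====
-- def fn(a):
--     # The inner loop of A only matters when y = x**2 + 80 (the single y making f1 false).
--     # y must also lie in range(1, 1000), i.e. x**2 <= 919, i.e. x <= 30.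
--     for x in range(1, 31):
--         y = x * x + 80
--         if a >= 13 * x - 14 and a >= y * y + 15:
--             return False
--     return True
-- ===== Notes on version B (the rewrite author's own statement) =====
-- stated objective: faster
-- what changed: Instead of scanning all pairs of x and y, B loops only over x and computes directly the unique y that falsifies f1, skipping x whenever that y falls outside the range.
import Mathlib
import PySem

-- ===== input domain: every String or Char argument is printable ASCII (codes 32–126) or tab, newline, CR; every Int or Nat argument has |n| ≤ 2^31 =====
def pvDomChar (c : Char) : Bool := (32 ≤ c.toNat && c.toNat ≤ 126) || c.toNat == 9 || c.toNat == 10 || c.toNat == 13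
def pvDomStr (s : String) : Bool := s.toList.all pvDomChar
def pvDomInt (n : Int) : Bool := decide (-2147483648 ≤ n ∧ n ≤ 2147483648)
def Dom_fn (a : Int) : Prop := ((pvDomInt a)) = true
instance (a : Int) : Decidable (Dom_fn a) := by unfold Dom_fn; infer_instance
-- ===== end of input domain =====

-- B replaces A's 999×999 scan of (x,y) pairs by a 30-iteration loop over x with y = x²+80 fixed (faster, asymptotic).

-- ===== PORT A =====
-- A's two nested loops return False as soon as ¬(f1 ∨ f2 ∨ f3) holds and True after both
-- loops finish; that early-return shape is exactly ¬∃, i.e. the negation of List.any.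
def fn (a : Int) : Bool :=
  ! ((PySem.List.pyRange 1 1000 1).any fun x =>
      (PySem.List.pyRange 1 1000 1).any fun y =>
        ! (decide (y - x ^ 2 ≠ 80) || decide (a < 13 * x - 14) || decide (a < y ^ 2 + 15)))

-- ===== PORT B =====
def fn_alt (a : Int) : Bool :=
  ! ((PySem.List.pyRange 1 31 1).any fun x =>
      let y := x * x + 80
      decide (a ≥ 13 * x - 14) && decide (a ≥ y * y + 15))

-- ===== PRECONDITION & SPEC =====
def Spec_fn (a : Int) (out : Bool) : Prop := out = fn_alt a
instance (a : Int) (out : Bool) : Decidable (Spec_fn a out) := by unfold Spec_fn; infer_instance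

-- ===== CLAIM (what is proved, stated in full; the proofs are below) =====
def Claim_equal_fn : Prop := ∀ (a : Int), Dom_fn a → Spec_fn a (fn a)

-- ===== LEMMAS AND PROOFS =====

-- A hits its early return iff a ≥ 6576 (forced by x = 1, y = 81, the minimising pair).
theorem fn_eq_threshold (a : Int) : fn a = decide (a < 6576) := by
  unfold fn
  by_cases h : a < 6576
  · simp only [h, decide_true]
    rw [Bool.not_eq_eq_eq_not, Bool.not_true, List.any_eq_false]
    intro x hx
    rw [Bool.not_eq_true, List.any_eq_false]
    intro y hy
    rw [PySem.List.mem_pyRange_one] at hx hy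
    rw [Bool.not_eq_true, Bool.not_eq_eq_eq_not, Bool.not_false, Bool.or_eq_true_iff,
      Bool.or_eq_true_iff]
    by_contra hc
    simp only [decide_eq_true_eq, not_or, not_lt, Decidable.not_not] at hc
    obtain ⟨⟨h1, h2⟩, h3⟩ := hc
    -- y = x² + 80 with x ≥ 1 forces y ≥ 81, hence a ≥ y² + 15 ≥ 6576
    have hy81 : 81 ≤ y := by nlinarith [hx.1]
    nlinarith
  · simp only [h, decide_false]
    rw [Bool.not_eq_eq_eq_not, Bool.not_false, List.any_eq_true]
    refine ⟨1, by rw [PySem.List.mem_pyRange_one]; omega, ?_⟩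
    rw [List.any_eq_true]
    refine ⟨81, by rw [PySem.List.mem_pyRange_one]; omega, ?_⟩
    simp only [Bool.not_eq_eq_eq_not, Bool.not_true, Bool.or_eq_false_iff, decide_eq_false_iff_not,
      not_not, not_lt]
    omega

theorem fn_alt_eq_threshold (a : Int) : fn_alt a = decide (a < 6576) := by
  unfold fn_alt
  by_cases h : a < 6576
  · simp only [h, decide_true]
    rw [Bool.not_eq_eq_eq_not, Bool.not_true, List.any_eq_false]
    intro x hx
    rw [PySem.List.mem_pyRange_one] at hx
    rw [Bool.not_eq_true]
    show (decide (a ≥ 13 * x - 14) && decide (a ≥ (x * x + 80) * (x * x + 80) + 15)) = false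
    by_contra hc
    rw [Bool.not_eq_false, Bool.and_eq_true, decide_eq_true_eq, decide_eq_true_eq] at hc
    have : 81 ≤ x * x + 80 := by nlinarith [hx.1]
    nlinarith [hc.2]
  · simp only [h, decide_false]
    rw [Bool.not_eq_eq_eq_not, Bool.not_false, List.any_eq_true]
    refine ⟨1, by rw [PySem.List.mem_pyRange_one]; omega, ?_⟩
    simp only [Bool.and_eq_true, decide_eq_true_eq]
    omega

-- ===== VERDICT (by name: the statement is the Claim_ definition above) =====
theorem fn_spec : Claim_equal_fn := by
  intro a _
  unfold Spec_fn
  rw [fn_eq_threshold, fn_alt_eq_threshold]
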